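-- pv_equiv track=rewrite | github.com/Vanchnav/blom_scheme | blom/functions.py | LNcreate
-- ===== SOURCE A (Python) =====
-- def LNcreate(l,k):
--     LN=[]
--     ln=[]
--     for j in range (0,int(len(l))-1):
--         if ln==[]:
--             ln.append(l[j][k-1])
--             if l[j+1][k-1]<=l[j][k-1]:
--                 LN.append(ln)
--                 ln=[]
--         else:
--             if l[j+1][k-1]<=l[j][k-1]:
--                 ln.append(l[j][k-1])
--                 LN.append(ln)
--                 ln=[]
--             else:
--                 ln.append(l[j][k-1])
--     LN.append([l[int(len(l)-1)][k-1]])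
--     return(LN)
-- ===== SOURCE B (Python) =====
-- def LNcreate(l, k):
--     v = [row[k - 1] for row in l]
--     n = len(l)
--     breaks = [j for j in range(n - 1) if v[j + 1] <= v[j]]
--     LN = []
--     start = 0
--     for j in breaks:
--         LN.append(v[start:j + 1])
--         start = j + 1
--     LN.append([v[n - 1]])
--     return LN
-- ===== Notes on version B (the rewrite author's own statement) =====
-- stated objective: alternative
-- what changed: B replaces A's running-accumulator state machine (the ln buffer with an empty/non-empty branch) by first materializing the column v, computing the list of break indices, and then emitting each run as a slice v[start:j+1] between consecutive breaks; the discarded trailing partial run and the forced final singleton fall out of slicing only up to break points.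
import Mathlib
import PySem

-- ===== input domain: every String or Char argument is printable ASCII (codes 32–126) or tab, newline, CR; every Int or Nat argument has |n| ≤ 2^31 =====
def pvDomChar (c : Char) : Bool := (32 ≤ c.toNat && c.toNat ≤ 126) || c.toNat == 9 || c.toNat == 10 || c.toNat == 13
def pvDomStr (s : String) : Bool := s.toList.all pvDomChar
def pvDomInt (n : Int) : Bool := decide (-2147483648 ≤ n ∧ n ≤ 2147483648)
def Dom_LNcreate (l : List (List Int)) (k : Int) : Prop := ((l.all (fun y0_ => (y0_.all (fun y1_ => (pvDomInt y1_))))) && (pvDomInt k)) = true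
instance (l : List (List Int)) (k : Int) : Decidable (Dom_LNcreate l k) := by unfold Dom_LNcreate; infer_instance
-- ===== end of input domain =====

-- B builds the break-index list first and emits each run as a slice v[start:j+1];
-- A maintains a running accumulator with an empty/non-empty branch. Same values, proved equal.

-- ===== PORT A =====
-- literal transliteration of A: for j in range(0, len(l)-1) with state (LN, ln)
def LNcreate (l : List (List Int)) (k : Int) : List (List Int) :=
  let st := (PySem.List.pyRange 0 ((l.length : Int) - 1) 1).foldl
    (fun (st : List (List Int) × List Int) j =>
      let LN := st.1
      let ln := st.2
      let vj := PySem.List.pyGetD (PySem.List.pyGetD l j []) (k - 1) 0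
      let vj1 := PySem.List.pyGetD (PySem.List.pyGetD l (j + 1) []) (k - 1) 0
      if ln = [] then
        let ln := ln ++ [vj]
        if vj1 ≤ vj then (LN ++ [ln], ([] : List Int)) else (LN, ln)
      else
        if vj1 ≤ vj then (LN ++ [ln ++ [vj]], ([] : List Int))
        else (LN, ln ++ [vj]))
    ([], [])
  st.1 ++ [[PySem.List.pyGetD (PySem.List.pyGetD l ((l.length : Int) - 1) []) (k - 1) 0]]

-- ===== PORT B =====
-- literal transliteration of B from Source B: column v, break indices, then slices
def LNcreate_alt (l : List (List Int)) (k : Int) : List (List Int) :=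
  let v := l.map (fun row => PySem.List.pyGetD row (k - 1) 0)
  let n := l.length
  let breaks := (PySem.List.pyRange 0 ((n : Int) - 1) 1).filter
    (fun j => decide (PySem.List.pyGetD v (j + 1) 0 ≤ PySem.List.pyGetD v j 0))
  let st := breaks.foldl
    (fun (st : List (List Int) × Int) j =>
      (st.1 ++ [PySem.List.slice v (some st.2) (some (j + 1))], j + 1))
    ([], 0)
  st.1 ++ [[PySem.List.pyGetD v ((n : Int) - 1) 0]]

-- ===== PRECONDITION & SPEC =====
-- A raises IndexError on the empty list (l[len(l)-1]) and whenever some row cannot be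
-- indexed at k-1 under Python's negative-index rule; Pre_ excludes exactly those inputs.
def Pre_LNcreate (l : List (List Int)) (k : Int) : Prop :=
  l ≠ [] ∧ ∀ row ∈ l, PySem.Raise.InRange row.length (k - 1)
instance (l : List (List Int)) (k : Int) : Decidable (Pre_LNcreate l k) := by
  unfold Pre_LNcreate; infer_instance

def pvWitness_LNcreate : List (List Int) × Int := ([[1], [2], [1]], 1)

def Spec_LNcreate (l : List (List Int)) (k : Int) (out : List (List Int)) : Prop := out = LNcreate_alt l k
instance (l : List (List Int)) (k : Int) (out : List (List Int)) : Decidable (Spec_LNcreate l k out) := by unfold Spec_LNcreate; infer_instance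

-- ===== CLAIM (what is proved, stated in full; the proofs are below) =====
def Claim_equal_LNcreate : Prop := ∀ (l : List (List Int)) (k : Int), Dom_LNcreate l k → Pre_LNcreate l k → Spec_LNcreate l k (LNcreate l k)

-- ===== LEMMAS AND PROOFS =====

-- Nat-indexed core of A's loop body (uniform step; the ln=[] branch collapses into it)
def stepA (v : List Int) (st : List (List Int) × List Int) (j : Nat) : List (List Int) × List Int :=
  if v.getD (j + 1) 0 ≤ v.getD j 0 then (st.1 ++ [st.2 ++ [v.getD j 0]], [])
  else (st.1, st.2 ++ [v.getD j 0])

-- Nat-indexed core of B's loop body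
def stepB (v : List Int) (st : List (List Int) × Nat) (j : Nat) : List (List Int) × Nat :=
  (st.1 ++ [(v.drop st.2).take (j + 1 - st.2)], j + 1)

def brk (v : List Int) (j : Nat) : Bool := decide (v.getD (j + 1) 0 ≤ v.getD j 0)

theorem take_succ_getD (v : List Int) (s a : Nat) (hs : s ≤ a) (ha : a < v.length) :
    (v.drop s).take (a - s) ++ [v.getD a 0] = (v.drop s).take (a + 1 - s) := by
  have h1 : a - s < (v.drop s).length := by simp [List.length_drop]; omega
  have h2 : a + 1 - s = (a - s) + 1 := by omega
  rw [h2, List.take_add_one]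
  have : (v.drop s)[a - s]? = some (v.getD a 0) := by
    rw [List.getElem?_drop]
    have : s + (a - s) = a := by omega
    rw [this, List.getElem?_eq_getElem ha, List.getD_eq_getElem v 0 ha]
  simp [this]

-- the invariant lemma: A's fold over [a, a+m) with ln = v[s:a] matches B's fold over the breaks in [a, a+m)
theorem core_eq (v : List Int) (m : Nat) :
    ∀ (a s : Nat) (LN : List (List Int)), s ≤ a → a + m + 1 ≤ v.length →
    (List.range' a m).foldl (stepA v) (LN, (v.drop s).take (a - s)) =
      (let r := ((List.range' a m).filter (brk v)).foldl (stepB v) (LN, s)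
       (r.1, (v.drop r.2).take (a + m - r.2))) := by
  induction m with
  | zero => intro a s LN hs _; simp
  | succ m ih =>
    intro a s LN hs hlen
    rw [List.range'_succ]
    by_cases hb : brk v a
    · have hb' : v.getD (a + 1) 0 ≤ v.getD a 0 := by
        have := of_decide_eq_true hb
        simpa [brk] using this
      have step1 : stepA v (LN, (v.drop s).take (a - s)) a
          = (LN ++ [(v.drop s).take (a + 1 - s)], []) := by
        unfold stepA
        rw [if_pos hb', take_succ_getD v s a hs (by omega)]
      have hempty : ([] : List Int) = (v.drop (a+1)).take ((a+1) - (a+1)) := by simp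
      simp only [List.foldl_cons, List.filter_cons, hb, if_true, step1]
      rw [hempty, ih (a+1) (a+1) (LN ++ [(v.drop s).take (a + 1 - s)]) (le_refl _) (by omega)]
      simp [stepB]
      ring_nf
    · have hb' : ¬ v.getD (a + 1) 0 ≤ v.getD a 0 := by simpa [brk] using hb
      have step1 : stepA v (LN, (v.drop s).take (a - s)) a
          = (LN, (v.drop s).take (a + 1 - s)) := by
        unfold stepA
        rw [if_neg hb', take_succ_getD v s a hs (by omega)]
      simp only [List.foldl_cons, List.filter_cons, hb, step1]
      rw [ih (a+1) s LN (by omega) (by omega)]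
      simp
      ring_nf

theorem foldl_ptwise {α γ : Type} (xs : List α) :
    ∀ (f : γ → α → γ) (g : γ → α → γ) (init : γ), (∀ st, ∀ x ∈ xs, f st x = g st x) →
    xs.foldl f init = xs.foldl g init := by
  induction xs with
  | nil => intro f g init _; rfl
  | cons x xs ih =>
    intro f g init h
    simp only [List.foldl_cons]
    rw [h init x (by simp)]
    exact ih f g _ (fun st y hy => h st y (by simp [hy]))

-- the Int-state fold of B's port equals the Nat-state fold stepB
theorem bfold (v : List Int) (js : List Nat) :
    ∀ (LN : List (List Int)) (sI : Int) (s : Nat), sI = (s : Int) →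
    (js.map (fun j : Nat => (j : Int))).foldl
        (fun (st : List (List Int) × Int) j =>
          (st.1 ++ [PySem.List.slice v (some st.2) (some (j + 1))], j + 1)) (LN, sI)
      = ((js.foldl (stepB v) (LN, s)).1, ((js.foldl (stepB v) (LN, s)).2 : Int)) := by
  induction js with
  | nil => intro LN sI s hs; simp [hs]
  | cons j js ih =>
    intro LN sI s hs
    simp only [List.map_cons, List.foldl_cons, hs]
    have h1 : ((j : Int) + 1) = (((j + 1 : Nat)) : Int) := by push_cast; ring
    rw [h1, PySem.List.slice_natCast]
    have h2 : stepB v (LN, s) j = (LN ++ [(v.drop s).take (j + 1 - s)], j + 1) := rfl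
    rw [h2]
    exact ih _ _ _ rfl

-- A's port, rewritten through the Nat-indexed core stepA
theorem portA_eq (l : List (List Int)) (k : Int) (h : l ≠ []) :
    LNcreate l k =
      ((List.range' 0 (l.length - 1)).foldl
          (stepA (l.map fun row => PySem.List.pyGetD row (k - 1) 0)) ([], [])).1
        ++ [[(l.map fun row => PySem.List.pyGetD row (k - 1) 0).getD (l.length - 1) 0]] := by
  have hn : 1 ≤ l.length := List.length_pos_of_ne_nil h
  have hcast : ((l.length : Int) - 1) = ((l.length - 1 : Nat) : Int) := by push_cast [hn]; ring
  unfold LNcreate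
  rw [hcast, PySem.List.pyRange_one]
  simp only [Int.sub_zero, Int.toNat_natCast, List.range_eq_range', List.foldl_map, zero_add]
  have hfin : PySem.List.pyGetD (PySem.List.pyGetD l (((l.length - 1 : Nat) : Nat) : Int) []) (k - 1) 0
      = (l.map fun row => PySem.List.pyGetD row (k - 1) 0).getD (l.length - 1) 0 := by
    rw [PySem.List.pyGetD_natCast, List.getD_eq_getElem l [] (by omega),
        List.getD_eq_getElem _ 0 (by simp; omega)]
    simp
  rw [hfin]
  refine congrArg (fun K => K ++ [[(l.map fun row => PySem.List.pyGetD row (k - 1) 0).getD (l.length - 1) 0]]) (congrArg Prod.fst ?_)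
  apply foldl_ptwise
  intro st j hj
  have hj' : j < l.length - 1 := by
    have := List.mem_range'.mp hj; omega
  have e1 : PySem.List.pyGetD l ((j : Int)) [] = l[j]'(by omega) := by
    rw [PySem.List.pyGetD_natCast, List.getD_eq_getElem l [] (by omega)]
  have e2 : ((j : Int) + 1) = (((j + 1 : Nat)) : Int) := by push_cast; ring
  have e3 : PySem.List.pyGetD l ((j : Int) + 1) [] = l[j + 1]'(by omega) := by
    rw [e2, PySem.List.pyGetD_natCast, List.getD_eq_getElem l [] (by omega)]
  have v1 : (l.map fun row => PySem.List.pyGetD row (k - 1) 0).getD j 0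
      = PySem.List.pyGetD (l[j]'(by omega)) (k - 1) 0 := by
    rw [List.getD_eq_getElem _ 0 (by simp; omega)]; simp
  have v2 : (l.map fun row => PySem.List.pyGetD row (k - 1) 0).getD (j + 1) 0
      = PySem.List.pyGetD (l[j + 1]'(by omega)) (k - 1) 0 := by
    rw [List.getD_eq_getElem _ 0 (by simp; omega)]; simp
  simp only [e1, e3, stepA, v1, v2]
  by_cases hln : st.2 = [] <;> simp [hln]

-- B's port, rewritten through the Nat-indexed core stepB
theorem portB_eq (l : List (List Int)) (k : Int) (h : l ≠ []) :
    LNcreate_alt l k =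
      (((List.range' 0 (l.length - 1)).filter
            (brk (l.map fun row => PySem.List.pyGetD row (k - 1) 0))).foldl
          (stepB (l.map fun row => PySem.List.pyGetD row (k - 1) 0)) ([], 0)).1
        ++ [[(l.map fun row => PySem.List.pyGetD row (k - 1) 0).getD (l.length - 1) 0]] := by
  have hn : 1 ≤ l.length := List.length_pos_of_ne_nil h
  have hcast : ((l.length : Int) - 1) = ((l.length - 1 : Nat) : Int) := by push_cast [hn]; ring
  unfold LNcreate_alt
  simp only [List.length_map]
  rw [hcast, PySem.List.pyRange_one]
  simp only [Int.sub_zero, Int.toNat_natCast, List.range_eq_range', zero_add]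
  rw [List.filter_map]
  have hpred : (List.range' 0 (l.length - 1)).filter
      ((fun j => decide (PySem.List.pyGetD (l.map fun row => PySem.List.pyGetD row (k - 1) 0) (j + 1) 0
          ≤ PySem.List.pyGetD (l.map fun row => PySem.List.pyGetD row (k - 1) 0) j 0))
        ∘ (fun x : Nat => (x : Int)))
      = (List.range' 0 (l.length - 1)).filter (brk (l.map fun row => PySem.List.pyGetD row (k - 1) 0)) := by
    apply List.filter_congr
    intro j _
    have e2 : ((j : Int) + 1) = (((j + 1 : Nat)) : Int) := by push_cast; ring
    have e3 : PySem.List.pyGetD (l.map fun row => PySem.List.pyGetD row (k - 1) 0) ((j : Int) + 1) 0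
        = (l.map fun row => PySem.List.pyGetD row (k - 1) 0).getD (j + 1) 0 := by
      rw [e2, PySem.List.pyGetD_natCast]
    simp [brk, e3]
  rw [hpred,
    bfold (l.map fun row => PySem.List.pyGetD row (k - 1) 0)
      ((List.range' 0 (l.length - 1)).filter (brk (l.map fun row => PySem.List.pyGetD row (k - 1) 0)))
      [] 0 0 (by simp)]
  rw [PySem.List.pyGetD_natCast]

-- glue: the two cores agree on the first component (that is all the final append uses)
theorem cores_eq (v : List Int) (h : v ≠ []) :
    ((List.range' 0 (v.length - 1)).foldl (stepA v) ([], [])).1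
      = (((List.range' 0 (v.length - 1)).filter (brk v)).foldl (stepB v) ([], 0)).1 := by
  have hn : 1 ≤ v.length := List.length_pos_of_ne_nil h
  have h0 : ([] : List Int) = (v.drop 0).take (0 - 0) := by simp
  have := core_eq v (v.length - 1) 0 0 [] (le_refl 0) (by omega)
  rw [h0]
  rw [this]

-- ===== VERDICT (by name: the statement is the Claim_ definition above) =====
theorem LNcreate_spec : Claim_equal_LNcreate := by
  intro l k _hd hpre
  obtain ⟨hne, -⟩ := hpre
  unfold Spec_LNcreate
  rw [portA_eq l k hne, portB_eq l k hne]
  have hv : (l.map fun row => PySem.List.pyGetD row (k - 1) 0) ≠ [] := by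
    simpa using hne
  have hlen : (l.map fun row => PySem.List.pyGetD row (k - 1) 0).length = l.length := by simp
  rw [← hlen, cores_eq _ hv]
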